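-- pv_equiv track=rewrite | github.com/vuvu700/workTime | utils.py | isEmptySubActions
-- ===== SOURCE A (Python) =====
-- def isEmptySubActions(subActions:"list[tuple[_SubActionType, list[_T]]]")->bool:
--     """`subActions`: from first actions done to the last done (they must not be empty)"""
--     if len(subActions) == 0:
--             return True # => no sub action
--     # => self has some sub action
--     # test if they cancel each other
--     elementsState: "dict[_T, _SubActionType]" = {}
--     """the elements inside are the ones that have been modified"""
--     for (actionType, subElements) in reversed(subActions):
--         for element in subElements:
--             if element not in elementsState:
--                 elementsState[element] = actionType
--                 continue
--             # => activity alredy listed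
--             currentActionType: "_SubActionType" = elementsState[element]
--             assert currentActionType != actionType, \
--                 ValueError(f"invalide subActions, doing twice the action: {currentActionType} on {element}")
--             # => actions cancel
--             elementsState.pop(element)
--             continue
--     # activityState is empty <=> all sub actions got canceled
--     #   <=> did nothing <=> is empty
--     return (len(elementsState) == 0)
-- ===== SOURCE B (Python) =====
-- def isEmptySubActions(subActions:"list[tuple[_SubActionType, list[_T]]]")->bool:
--     """`subActions`: from first actions done to the last done (they must not be empty)
--
--     On valid inputs (where the original's assertion holds), the sub actions all
--     cancel out exactly when every element is touched an even number of times;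
--     so count occurrences per element and check parity.
--     """
--     counts = {}
--     for (_actionType, subElements) in subActions:
--         for element in subElements:
--             counts[element] = counts.get(element, 0) + 1
--     return all(c % 2 == 0 for c in counts.values())
-- ===== Notes on version B (the rewrite author's own statement) =====
-- stated objective: simpler
-- what changed: Replaces A's reversed-order toggle dictionary (insert/assert/pop per occurrence) by a single forward pass that counts occurrences per element and returns whether every count is even; on valid inputs cancellation is exactly even parity per element, so no toggle state and no reversed traversal are needed.
import Mathlib
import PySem

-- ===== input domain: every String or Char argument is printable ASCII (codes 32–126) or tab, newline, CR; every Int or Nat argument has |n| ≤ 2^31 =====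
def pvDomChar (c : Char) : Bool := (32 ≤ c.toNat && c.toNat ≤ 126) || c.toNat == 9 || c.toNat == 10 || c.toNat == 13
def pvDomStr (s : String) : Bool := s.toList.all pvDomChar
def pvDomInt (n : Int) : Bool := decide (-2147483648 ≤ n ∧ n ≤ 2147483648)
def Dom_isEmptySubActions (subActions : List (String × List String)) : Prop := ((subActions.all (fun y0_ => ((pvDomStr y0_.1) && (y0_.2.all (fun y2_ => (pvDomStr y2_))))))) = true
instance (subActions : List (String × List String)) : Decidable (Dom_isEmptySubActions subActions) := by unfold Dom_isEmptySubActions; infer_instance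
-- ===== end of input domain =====

-- B replaces A's reversed-order toggle dictionary (insert / assert / pop per occurrence)
-- by a single forward pass counting occurrences per element and a parity check (objective: simpler).

-- ===== PORT A =====
def isEmptySubActions (subActions : List (String × List String)) : Bool :=
  if subActions.length == 0 then true
  else
    let elementsState :=
      subActions.reverse.foldl (fun st p =>
        p.2.foldl (fun st e =>
          match st.get? e with
          | none => st.insert e p.1
          | some _currentActionType =>
            -- `assert currentActionType != actionType`: the raising case is excluded by Pre_
            st.erase e) st)
        (PySem.Dict.empty : PySem.Dict String String)
    elementsState.size == 0

-- ===== PORT B =====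
def isEmptySubActions_alt (subActions : List (String × List String)) : Bool :=
  let counts :=
    subActions.foldl (fun d p =>
      p.2.foldl (fun d e => d.insert e (d.getD e 0 + 1)) d)
      (PySem.Dict.empty : PySem.Dict String Int)
  counts.values.all (fun c => PySem.Int.mod c 2 == 0)

-- ===== PRECONDITION & SPEC =====
-- A's traversal order: the (actionType, element) occurrences, from last action to first
def pvOccs (subActions : List (String × List String)) : List (String × String) :=
  subActions.reverse.flatMap (fun p => p.2.map (fun e => (p.1, e)))

-- consecutive pairs (0,1), (2,3), … must have differing action types
def pvPairsOk : List String → Bool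
  | a :: b :: r => (a != b) && pvPairsOk r
  | _ => true

-- Pre_ excludes exactly the inputs on which A raises AssertionError: some element whose
-- occurrences, paired up two at a time in A's reversed traversal order, repeat the same
-- action type within a pair.
def Pre_isEmptySubActions (subActions : List (String × List String)) : Prop :=
  ∀ e ∈ (pvOccs subActions).map (·.2),
    pvPairsOk (((pvOccs subActions).filter (fun q => q.2 == e)).map (·.1)) = true
instance (subActions : List (String × List String)) : Decidable (Pre_isEmptySubActions subActions) := by
  unfold Pre_isEmptySubActions; infer_instance

def pvWitness_isEmptySubActions : (List (String × List String)) :=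
  [("add", ["a", "b"]), ("remove", ["b", "a"])]

def Spec_isEmptySubActions (subActions : List (String × List String)) (out : Bool) : Prop := out = isEmptySubActions_alt subActions
instance (subActions : List (String × List String)) (out : Bool) : Decidable (Spec_isEmptySubActions subActions out) := by unfold Spec_isEmptySubActions; infer_instance

-- ===== CLAIM (what is proved, stated in full; the proofs are below) =====
def Claim_equal_isEmptySubActions : Prop := ∀ (subActions : List (String × List String)), Dom_isEmptySubActions subActions → Pre_isEmptySubActions subActions → Spec_isEmptySubActions subActions (isEmptySubActions subActions)

-- ===== LEMMAS AND PROOFS =====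

-- A's per-occurrence state update, as a single-step function
def pvToggle (st : PySem.Dict String String) (q : String × String) : PySem.Dict String String :=
  match st.get? q.2 with
  | none => st.insert q.2 q.1
  | some _ => st.erase q.2

lemma pv_contains_erase (d : PySem.Dict String String) (k e : String) :
    ((d.erase k).contains e) = (d.contains e && !(e == k)) := by
  obtain ⟨items⟩ := d
  simp only [PySem.Dict.erase, PySem.Dict.contains]
  induction items with
  | nil => simp
  | cons p t ih =>
    by_cases hpk : p.1 = k <;> by_cases hpe : p.1 = e <;>
      simp_all [List.any_cons] <;>
      first
        | (rw [show (k == e) = false from by simp_all]; simp)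
        | (rw [show (p.1 == e) = false from by simp_all]; simp)

-- membership in A's toggle dictionary is exactly odd occurrence parity so far
lemma pv_toggle_contains (xs : List (String × String)) (d : PySem.Dict String String) (e : String) :
    ((xs.foldl pvToggle d).contains e)
      = ((d.contains e).xor (decide ((xs.countP (fun q => q.2 == e)) % 2 = 1))) := by
  induction xs generalizing d with
  | nil => simp
  | cons q t ih =>
    rw [List.foldl_cons, ih, List.countP_cons]
    have hct : (pvToggle d q).contains e
        = ((d.contains e).xor (e == q.2)) := by
      unfold pvToggle
      rcases hg : d.get? q.2 with _ | v
      · have hc : d.contains q.2 = false := by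
          rw [PySem.Dict.contains_eq_isSome_get?, hg]; rfl
        rw [PySem.Dict.contains_insert]
        by_cases he : e = q.2
        · subst he; simp [hc]
        · have h0 : (e == q.2) = false := by simp [he]
          simp [h0]
      · have hc : d.contains q.2 = true := by
          rw [PySem.Dict.contains_eq_isSome_get?, hg]; rfl
        rw [pv_contains_erase]
        by_cases he : e = q.2
        · subst he; simp [hc]
        · have h0 : (e == q.2) = false := by simp [he]
          simp [h0]
    rw [hct]
    by_cases he : q.2 = e
    · subst he
      simp only [beq_self_eq_true, if_true]
      cases hpar : decide ((t.countP fun q' => q'.2 == q.2) % 2 = 1) <;>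
        cases hcd : d.contains q.2 <;> simp_all <;> omega
    · have h1 : (q.2 == e) = false := by simp [he]
      have h2 : (e == q.2) = false := by simp [Ne.symm he]
      simp [h1, h2]

lemma pv_size_zero_iff (d : PySem.Dict String String) :
    ((d.size == 0) = true) ↔ ∀ e, d.contains e = false := by
  obtain ⟨items⟩ := d
  cases items with
  | nil => simp [PySem.Dict.size, PySem.Dict.contains]
  | cons p t =>
    simp only [PySem.Dict.size, PySem.Dict.contains]
    constructor
    · intro h; simp at h
    · intro h
      have := h p.1
      simp [List.any_cons] at this

-- A's nested fold is the flat fold of pvToggle over the occurrence list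
lemma pv_portA_fold (subActions : List (String × List String)) :
    (subActions.reverse.foldl (fun st p =>
        p.2.foldl (fun st e =>
          match st.get? e with
          | none => st.insert e p.1
          | some _ => st.erase e) st)
        (PySem.Dict.empty : PySem.Dict String String))
      = (pvOccs subActions).foldl pvToggle PySem.Dict.empty := by
  rw [pvOccs, List.flatMap_def, List.foldl_flatten, List.foldl_map]
  congr 1
  funext st p
  rw [List.foldl_map]
  rfl

-- counting e in the reversed traversal = counting e in the forward flattened elements
lemma pv_countP_occs (subActions : List (String × List String)) (e : String) :
    (pvOccs subActions).countP (fun q => q.2 == e)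
      = (subActions.flatMap (fun p => p.2)).count e := by
  rw [pvOccs, List.flatMap_def, List.countP_flatten, List.map_map,
      List.count, List.flatMap_def, List.countP_flatten, List.map_map]
  have h : ((List.countP fun q : String × String => q.2 == e) ∘ fun p : String × List String => p.2.map (fun e => (p.1, e)))
      = ((List.countP fun x => x == e) ∘ fun p : String × List String => p.2) := by
    funext p
    simp only [Function.comp, List.countP_map]
    rfl
  rw [h]; rw [List.map_reverse]; exact List.sum_reverse _

-- B returns true iff every element occurs an even number of times
lemma pv_portB_char (subActions : List (String × List String)) :
    (isEmptySubActions_alt subActions = true)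
      ↔ ∀ e ∈ subActions.flatMap (fun p => p.2),
          (subActions.flatMap (fun p => p.2)).count e % 2 = 0 := by
  set L := subActions.flatMap (fun p => p.2) with hL
  have hfold : subActions.foldl (fun d p =>
        p.2.foldl (fun d e => d.insert e (d.getD e 0 + 1)) d)
        (PySem.Dict.empty : PySem.Dict String Int)
      = PySem.Dict.counter L := by
    rw [hL, List.flatMap_def, ← PySem.Dict.foldl_insert_getD_add_one_eq_counter,
        List.foldl_flatten, List.foldl_map]
  have hv : (PySem.Dict.counter L).values
      = (PySem.Set.ofList L).map (fun k => (L.count k : Int)) := by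
    show (PySem.Dict.counter L).items.map (·.2) = _
    rw [PySem.Dict.items_counter, List.map_map]
    rfl
  show (PySem.Dict.values (subActions.foldl _ _)).all _ = true ↔ _
  rw [hfold, hv, List.all_map, List.all_eq_true]
  constructor
  · intro h e he
    have := h e (by rwa [PySem.Set.mem_ofList])
    simp only [Function.comp] at this
    have hm : PySem.Int.mod ((L.count e : Nat) : Int) 2 = ((L.count e % 2 : Nat) : Int) := by
      exact_mod_cast PySem.Int.mod_natCast (L.count e) 2
    rw [hm] at this
    simp at this; omega
  · intro h k hk
    have := h k (by rwa [PySem.Set.mem_ofList] at hk)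
    simp only [Function.comp]
    have hm : PySem.Int.mod ((L.count k : Nat) : Int) 2 = ((L.count k % 2 : Nat) : Int) := by
      exact_mod_cast PySem.Int.mod_natCast (L.count k) 2
    rw [hm, this]
    rfl

-- the two ports agree on every input (the Pre_ hypothesis is only needed for Python A,
-- which raises outside Pre_; the ports agree unconditionally)
lemma pv_ports_agree (subActions : List (String × List String)) :
    isEmptySubActions subActions = isEmptySubActions_alt subActions := by
  have hA : (isEmptySubActions subActions = true)
      ↔ ∀ e ∈ subActions.flatMap (fun p => p.2),
          (subActions.flatMap (fun p => p.2)).count e % 2 = 0 := by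
    unfold isEmptySubActions
    rcases subActions with _ | ⟨p, t⟩
    · simp
    · rw [if_neg (by simp)]
      simp only [pv_portA_fold]
      rw [pv_size_zero_iff]
      constructor
      · intro h e _
        have := h e
        rw [pv_toggle_contains, PySem.Dict.contains_empty, Bool.false_xor,
            pv_countP_occs] at this
        simp only [decide_eq_false_iff_not] at this
        omega
      · intro h e
        rw [pv_toggle_contains, PySem.Dict.contains_empty, Bool.false_xor,
            pv_countP_occs]
        by_cases he : e ∈ (p :: t).flatMap (fun p => p.2)
        · have := h e he
          simp only [decide_eq_false_iff_not]
          omega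
        · have : ((p :: t).flatMap (fun p => p.2)).count e = 0 :=
            List.count_eq_zero.2 he
          simp only [decide_eq_false_iff_not]
          omega
  rw [Bool.eq_iff_iff, hA, pv_portB_char]

-- ===== VERDICT (by name: the statement is the Claim_ definition above) =====
theorem isEmptySubActions_spec : Claim_equal_isEmptySubActions := by
  intro subActions _hdom _hpre
  exact pv_ports_agree subActions
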